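-- pv_equiv track=rewrite | github.com/SerpentAI/SerpentAI | lib/ocr.py | reconstruct_words
-- ===== SOURCE A (Python) =====
-- def reconstruct_words(word_bounding_boxes, characters):
--     words = dict()
--
--     for word_bounding_box in word_bounding_boxes:
--         words[word_bounding_box] = list()
--
--     for bounding_box, character in characters.items():
--         if character == "":
--             continue
--
--         # Grouping
--         for word_bounding_box in word_bounding_boxes:
--             is_contained = True
--
--             if bounding_box[0] < word_bounding_box[0]:
--                 is_contained = False
--
--             if bounding_box[1] < word_bounding_box[1]:
--                 is_contained = False
--
--             if bounding_box[2] > word_bounding_box[2]: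
--                 is_contained = False
--
--             if bounding_box[3] > word_bounding_box[3]:
--                 is_contained = False
--
--             if is_contained:
--                 words[word_bounding_box].append([bounding_box, character])
--
--     # Sorting
--     for word_bounding_box, character_data in words.items():
--         y_sorted = sorted(character_data, key=lambda cd: cd[0][0])
--         x_sorted = sorted(y_sorted, key=lambda cd: cd[0][1])
--
--         words[word_bounding_box] = [cd[1] for cd in x_sorted]
--
--     return ["".join(sorted_characters) for word_bounding_box, sorted_characters in words.items() if len(sorted_characters) > 0]
-- ===== SOURCE B (Python) =====
-- def reconstruct_words(word_bounding_boxes, characters):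
--     # Online insertion: no sort calls; every character is placed directly at its
--     # final position in each containing box's already-ordered bucket.
--     words = {wb: [] for wb in word_bounding_boxes}
--
--     for bb, ch in characters.items():
--         if ch == "":
--             continue
--
--         key = (bb[1], bb[0])
--
--         for wb in word_bounding_boxes:
--             if bb[0] >= wb[0] and bb[1] >= wb[1] and bb[2] <= wb[2] and bb[3] <= wb[3]:
--                 bucket = words[wb]
--                 i = len(bucket)
--                 while i > 0 and bucket[i - 1][0] > key:
--                     i -= 1
--                 bucket.insert(i, (key, ch))
--
--     return ["".join(ch for _, ch in bucket) for bucket in words.values() if bucket]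
-- ===== Notes on version B (the rewrite author's own statement) =====
-- stated objective: alternative
-- what changed: A batch-sorts: it buckets all characters per box and then runs a two-pass stable sort (by bbox[0], then bbox[1]) inside every bucket; B never calls sort: it keeps each bucket permanently ordered, inserting every character online at its final position via a right-to-left scan past strictly greater (bbox[1], bbox[0]) keys, which preserves A's stable tie order, so the whole sorting phase disappears.
import Mathlib
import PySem

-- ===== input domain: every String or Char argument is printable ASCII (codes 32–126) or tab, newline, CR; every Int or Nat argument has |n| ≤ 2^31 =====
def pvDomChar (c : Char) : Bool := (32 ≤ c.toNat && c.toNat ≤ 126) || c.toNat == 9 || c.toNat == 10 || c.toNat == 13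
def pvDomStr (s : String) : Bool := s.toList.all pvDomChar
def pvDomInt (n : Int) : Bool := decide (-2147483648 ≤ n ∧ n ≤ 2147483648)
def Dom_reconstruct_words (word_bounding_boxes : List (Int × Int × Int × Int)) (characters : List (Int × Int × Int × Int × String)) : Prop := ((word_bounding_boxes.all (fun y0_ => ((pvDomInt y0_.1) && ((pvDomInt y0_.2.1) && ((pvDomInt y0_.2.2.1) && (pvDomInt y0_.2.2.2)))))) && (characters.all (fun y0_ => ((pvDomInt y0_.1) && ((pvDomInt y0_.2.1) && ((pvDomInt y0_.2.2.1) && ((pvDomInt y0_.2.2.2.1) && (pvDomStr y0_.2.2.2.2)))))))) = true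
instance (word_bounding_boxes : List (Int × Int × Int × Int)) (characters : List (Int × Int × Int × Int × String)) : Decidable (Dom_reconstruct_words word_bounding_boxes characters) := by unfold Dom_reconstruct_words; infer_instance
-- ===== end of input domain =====

-- B never sorts: it keeps every box's bucket permanently ordered by inserting each character online
-- at its final position (alternative decomposition; neither version mutates its arguments).

-- ===== PORT A =====
-- the four sequential `if …: is_contained = False` statements of A, as a helper
def pyIsContained (bounding_box word_bounding_box : Int × Int × Int × Int) : Bool :=
  let is_contained := true
  let is_contained := if bounding_box.1 < word_bounding_box.1 then false else is_contained
  let is_contained := if bounding_box.2.1 < word_bounding_box.2.1 then false else is_contained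
  let is_contained := if bounding_box.2.2.1 > word_bounding_box.2.2.1 then false else is_contained
  let is_contained := if bounding_box.2.2.2 > word_bounding_box.2.2.2 then false else is_contained
  is_contained

def reconstruct_words (word_bounding_boxes : List (Int × Int × Int × Int)) (characters : List (Int × Int × Int × Int × String)) : List String :=
  -- `characters` is a Python dict keyed by the bounding box: canonicalize the association list
  let characters_dict : PySem.Dict (Int × Int × Int × Int) String :=
    PySem.Dict.ofList (characters.map (fun c => ((c.1, c.2.1, c.2.2.1, c.2.2.2.1), c.2.2.2.2)))
  -- words = dict(); for wbb in word_bounding_boxes: words[wbb] = list()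
  let words : PySem.Dict (Int × Int × Int × Int) (List ((Int × Int × Int × Int) × String)) :=
    word_bounding_boxes.foldl (fun d w => d.insert w []) PySem.Dict.empty
  -- grouping loop
  let words := characters_dict.items.foldl (fun d p =>
      if p.2 == "" then d
      else word_bounding_boxes.foldl (fun d w =>
        if pyIsContained p.1 w then d.modify w [] (fun l => l ++ [p]) else d) d) words
  -- sorting loop: words[wbb] = [cd[1] for cd in x_sorted]
  let words2 := words.items.map (fun p =>
      let y_sorted := PySem.List.sorted p.2 (fun cd => cd.1.1) false
      let x_sorted := PySem.List.sorted y_sorted (fun cd => cd.1.2.1) false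
      (p.1, x_sorted.map (fun cd => cd.2)))
  -- final comprehension
  words2.foldl (fun out p => if 0 < PySem.List.len p.2 then out ++ [PySem.Str.join "" p.2] else out) []

-- ===== PORT B =====
-- Python tuple comparison a > b on (Int × Int) pairs (lexicographic)
def pvTupGT (a b : Int × Int) : Bool := decide (b.1 < a.1) || (a.1 == b.1 && decide (b.2 < a.2))

-- the `while i > 0 and bucket[i-1][0] > key: i -= 1; bucket.insert(i, x)` loop of Source B:
-- walk the bucket from the right past strictly greater keys, then place x (done on the reversed list)
def pvBInsRev (x : (Int × Int) × String) : List ((Int × Int) × String) → List ((Int × Int) × String)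
  | [] => [x]
  | y :: t => if pvTupGT y.1 x.1 then y :: pvBInsRev x t else x :: y :: t

def pvBInsert (x : (Int × Int) × String) (bucket : List ((Int × Int) × String)) : List ((Int × Int) × String) :=
  (pvBInsRev x bucket.reverse).reverse

def reconstruct_words_alt (word_bounding_boxes : List (Int × Int × Int × Int)) (characters : List (Int × Int × Int × Int × String)) : List String :=
  let characters_dict : PySem.Dict (Int × Int × Int × Int) String :=
    PySem.Dict.ofList (characters.map (fun c => ((c.1, c.2.1, c.2.2.1, c.2.2.2.1), c.2.2.2.2)))
  -- words = {wb: [] for wb in word_bounding_boxes}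
  let words : PySem.Dict (Int × Int × Int × Int) (List ((Int × Int) × String)) :=
    word_bounding_boxes.foldl (fun d w => d.insert w []) PySem.Dict.empty
  -- single pass: place each character at its final position in every containing bucket
  let words := characters_dict.items.foldl (fun d p =>
      if p.2 == "" then d
      else
        let key := (p.1.2.1, p.1.1)
        word_bounding_boxes.foldl (fun d w =>
          if (decide (p.1.1 ≥ w.1) && decide (p.1.2.1 ≥ w.2.1) && decide (p.1.2.2.1 ≤ w.2.2.1) && decide (p.1.2.2.2 ≤ w.2.2.2)) then
            d.modify w [] (fun bucket => pvBInsert (key, p.2) bucket)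
          else d) d) words
  words.values.foldl (fun out bucket => if bucket ≠ [] then out ++ [PySem.Str.join "" (bucket.map (fun q => q.2))] else out) []

-- ===== PRECONDITION & SPEC =====
def Spec_reconstruct_words (word_bounding_boxes : List (Int × Int × Int × Int)) (characters : List (Int × Int × Int × Int × String)) (out : List String) : Prop := out = reconstruct_words_alt word_bounding_boxes characters
instance (word_bounding_boxes : List (Int × Int × Int × Int)) (characters : List (Int × Int × Int × Int × String)) (out : List String) : Decidable (Spec_reconstruct_words word_bounding_boxes characters out) := by unfold Spec_reconstruct_words; infer_instance

-- ===== CLAIM (what is proved, stated in full; the proofs are below) =====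
def Claim_equal_reconstruct_words : Prop := ∀ (word_bounding_boxes : List (Int × Int × Int × Int)) (characters : List (Int × Int × Int × Int × String)), Dom_reconstruct_words word_bounding_boxes characters → Spec_reconstruct_words word_bounding_boxes characters (reconstruct_words word_bounding_boxes characters)

-- ===== LEMMAS AND PROOFS =====

-- abbreviations used only in proofs
def pvCont (q w : Int × Int × Int × Int) : Bool :=
  decide (q.1 ≥ w.1) && decide (q.2.1 ≥ w.2.1) && decide (q.2.2.1 ≤ w.2.2.1) && decide (q.2.2.2 ≤ w.2.2.2)

def pvLt2 {α : Type} (k2 : α → Int) (a b : α) : Bool := decide (k2 a < k2 b)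

def pvLtLex {α : Type} (k1 k2 : α → Int) (a b : α) : Bool :=
  decide (k2 a < k2 b) || (k2 a == k2 b && decide (k1 a < k1 b))

def pvProj (p : (Int × Int × Int × Int) × String) : (Int × Int) × String := ((p.1.2.1, p.1.1), p.2)

theorem pvContA_eq (q w : Int × Int × Int × Int) : pyIsContained q w = pvCont q w := by
  unfold pyIsContained pvCont
  split_ifs <;> simp_all

theorem pvIns_nil {α : Type} (lt : α → α → Bool) (x : α) : PySem.List.insertBy lt x [] = [x] := by
  simp [PySem.List.insertBy]

theorem pvIns_cons {α : Type} (lt : α → α → Bool) (x y : α) (ys : List α) :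
    PySem.List.insertBy lt x (y :: ys) = if lt x y then x :: y :: ys else y :: PySem.List.insertBy lt x ys := by
  simp [PySem.List.insertBy]

theorem pvIns_split {α : Type} (lt : α → α → Bool) (x : α) :
    ∀ L : List α, ∃ u v, L = u ++ v ∧ PySem.List.insertBy lt x L = u ++ x :: v ∧
      (∀ y ∈ u, lt x y = false) ∧ (∀ h : v ≠ [], lt x (v.head h) = true) := by
  intro L
  induction L with
  | nil => exact ⟨[], [], by simp, by simpa using pvIns_nil lt x, by simp, by simp⟩
  | cons y t ih =>
      by_cases hy : lt x y = true
      · exact ⟨[], y :: t, by simp, by simp [pvIns_cons, hy], by simp, fun _ => by simpa using hy⟩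
      · obtain ⟨u, v, hL, hins, hu, hv⟩ := ih
        refine ⟨y :: u, v, by simp [hL], ?_, ?_, hv⟩
        · have hy' : lt x y = false := by simpa using hy
          simp [pvIns_cons, hy', hins]
        · intro z hz
          rcases List.mem_cons.mp hz with rfl | hz
          · simpa using hy
          · exact hu z hz

theorem pvIns_snoc_of_lt {α : Type} (lt : α → α → Bool) (x y : α) (h : lt x y = true) :
    ∀ T : List α, PySem.List.insertBy lt x (T ++ [y]) = PySem.List.insertBy lt x T ++ [y] := by
  intro T
  induction T with
  | nil => simp [pvIns_nil, pvIns_cons, h]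
  | cons a T ih =>
      rw [List.cons_append, pvIns_cons, pvIns_cons]
      by_cases ha : lt x a = true
      · simp [ha]
      · have ha' : lt x a = false := by simpa using ha
        simp [ha', ih]

theorem pvIns_congr {α : Type} (lt1 lt2 : α → α → Bool) (x : α) :
    ∀ L : List α, (∀ y ∈ L, lt1 x y = lt2 x y) → PySem.List.insertBy lt1 x L = PySem.List.insertBy lt2 x L := by
  intro L
  induction L with
  | nil => intro _; simp [pvIns_nil]
  | cons y t ih =>
      intro h
      rw [pvIns_cons, pvIns_cons, h y (by simp), ih (fun z hz => h z (by simp [hz]))]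

theorem pvSorted_append {α : Type} (key : α → Int) (L R : List α) :
    PySem.List.sorted (L ++ R) key false =
      R.foldl (fun acc x => PySem.List.insertBy (fun a b => decide (key a < key b)) x acc) (PySem.List.sorted L key false) := by
  rw [PySem.List.sorted_eq_foldl_insertBy, PySem.List.sorted_eq_foldl_insertBy, List.foldl_append]

-- boolean/arithmetic facts about the two comparators
theorem pvLtLex_iff {α : Type} (k1 k2 : α → Int) (a b : α) :
    pvLtLex k1 k2 a b = true ↔ (k2 a < k2 b ∨ (k2 a = k2 b ∧ k1 a < k1 b)) := by
  simp [pvLtLex]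

theorem pvLt2_iff {α : Type} (k2 : α → Int) (a b : α) : pvLt2 k2 a b = true ↔ k2 a < k2 b := by
  simp [pvLt2]

theorem pvLtLex_asymm {α : Type} (k1 k2 : α → Int) (a b : α) (h : pvLtLex k1 k2 a b = true) :
    pvLtLex k1 k2 b a = false := by
  cases hc : pvLtLex k1 k2 b a with
  | false => rfl
  | true => exfalso; rw [pvLtLex_iff] at h hc; omega

theorem pvLtLex_neg_trans {α : Type} (k1 k2 : α → Int) (a b c : α)
    (h1 : pvLtLex k1 k2 a b = false) (h2 : pvLtLex k1 k2 b c = false) : pvLtLex k1 k2 a c = false := by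
  cases hc : pvLtLex k1 k2 a c with
  | false => rfl
  | true =>
      exfalso
      rw [pvLtLex_iff] at hc
      have n1 : ¬ (pvLtLex k1 k2 a b = true) := by simp [h1]
      have n2 : ¬ (pvLtLex k1 k2 b c = true) := by simp [h2]
      rw [pvLtLex_iff] at n1 n2
      omega

theorem pvLtLex_false_left {α : Type} (k1 k2 : α → Int) (x y z : α)
    (hxy : pvLtLex k1 k2 x y = true) (hzy : pvLtLex k1 k2 z y = false) : pvLtLex k1 k2 z x = false := by
  cases hc : pvLtLex k1 k2 z x with
  | false => rfl
  | true =>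
      exfalso
      rw [pvLtLex_iff] at hxy hc
      have n : ¬ (pvLtLex k1 k2 z y = true) := by simp [hzy]
      rw [pvLtLex_iff] at n
      omega

-- pairwise "no later element is lex-smaller" is preserved by lex insertion
theorem pvIns_pairwise {α : Type} (k1 k2 : α → Int) (x : α) :
    ∀ S : List α, S.Pairwise (fun a b => pvLtLex k1 k2 b a = false) →
      (PySem.List.insertBy (pvLtLex k1 k2) x S).Pairwise (fun a b => pvLtLex k1 k2 b a = false) := by
  intro S
  induction S with
  | nil => intro _; simp [pvIns_nil]
  | cons y S ih =>
      intro h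
      obtain ⟨hy, hS⟩ := List.pairwise_cons.mp h
      rw [pvIns_cons]
      by_cases hxy : pvLtLex k1 k2 x y = true
      · simp only [hxy, if_true]
        refine List.pairwise_cons.mpr ⟨?_, h⟩
        intro z hz
        rcases List.mem_cons.mp hz with rfl | hz
        · exact pvLtLex_asymm k1 k2 x z hxy
        · exact pvLtLex_false_left k1 k2 x y z hxy (hy z hz)
      · have hxy' : pvLtLex k1 k2 x y = false := by simpa using hxy
        simp only [hxy', Bool.false_eq_true, if_false]
        refine List.pairwise_cons.mpr ⟨?_, ih hS⟩
        intro z hz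
        rcases (PySem.List.mem_insertBy _ x z S).mp hz with rfl | hz
        · exact hxy'
        · exact hy z hz

-- on an ordered bucket, Source B's right-to-left scan places x exactly where lex insertion does
theorem pvGT_eq (x y : (Int × Int) × String) :
    pvTupGT y.1 x.1 = pvLtLex (fun q => q.1.2) (fun q => q.1.1) x y := by
  unfold pvTupGT pvLtLex
  by_cases h : x.1.1 = y.1.1
  · simp [h]
  · have h' : ¬ (y.1.1 = x.1.1) := fun e => h e.symm
    have e1 : (y.1.1 == x.1.1) = false := beq_eq_false_iff_ne.mpr h'
    have e2 : (x.1.1 == y.1.1) = false := beq_eq_false_iff_ne.mpr h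
    simp [e1, e2]

theorem pvBInsert_eq (x : (Int × Int) × String) :
    ∀ S : List ((Int × Int) × String),
      S.Pairwise (fun a b => pvLtLex (fun q : (Int × Int) × String => q.1.2) (fun q => q.1.1) b a = false) →
      pvBInsert x S = PySem.List.insertBy (pvLtLex (fun q => q.1.2) (fun q => q.1.1)) x S := by
  intro S
  induction S using List.reverseRecOn with
  | nil => intro _; simp [pvBInsert, pvBInsRev, pvIns_nil]
  | append_singleton T y ih =>
      intro h
      have hT : T.Pairwise (fun a b => pvLtLex (fun q : (Int × Int) × String => q.1.2) (fun q => q.1.1) b a = false) :=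
        (List.pairwise_append.mp h).1
      have hTy : ∀ z ∈ T, pvLtLex (fun q : (Int × Int) × String => q.1.2) (fun q => q.1.1) y z = false := by
        intro z hz
        exact (List.pairwise_append.mp h).2.2 z hz y (by simp)
      unfold pvBInsert
      rw [List.reverse_append, List.reverse_singleton, List.singleton_append]
      show (pvBInsRev x (y :: T.reverse)).reverse = _
      rw [pvBInsRev]
      by_cases hxy : pvLtLex (fun q : (Int × Int) × String => q.1.2) (fun q => q.1.1) x y = true
      · rw [pvGT_eq x y, hxy]
        simp only [if_true]
        rw [List.reverse_cons]
        have := ih hT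
        unfold pvBInsert at this
        rw [this, pvIns_snoc_of_lt _ x y hxy T]
      · have hxy' : pvLtLex (fun q : (Int × Int) × String => q.1.2) (fun q => q.1.1) x y = false := by
          simpa using hxy
        rw [pvGT_eq x y, hxy']
        simp only [Bool.false_eq_true, if_false]
        rw [PySem.List.insertBy_of_forall_not_before]
        · simp
        · intro z hz
          rcases List.mem_append.mp hz with hz | hz
          · exact pvLtLex_neg_trans _ _ x y z hxy' (hTy z hz)
          · rw [List.mem_singleton.mp hz]; exact hxy'

theorem pvFoldB_eq :
    ∀ (Q : List ((Int × Int) × String)) (S : List ((Int × Int) × String)),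
      S.Pairwise (fun a b => pvLtLex (fun q : (Int × Int) × String => q.1.2) (fun q => q.1.1) b a = false) →
      Q.foldl (fun b q => pvBInsert q b) S
        = Q.foldl (fun b q => PySem.List.insertBy (pvLtLex (fun q : (Int × Int) × String => q.1.2) (fun q => q.1.1)) q b) S := by
  intro Q
  induction Q with
  | nil => intro S _; rfl
  | cons q Q ih =>
      intro S hS
      rw [List.foldl_cons, List.foldl_cons, pvBInsert_eq q S hS]
      exact ih _ (pvIns_pairwise _ _ q S hS)

-- the key exchange law: a plain k2-insertion commutes past a (k2,k1)-lex insertion of a k1-smaller element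
theorem pvSC {α : Type} (k1 k2 : α → Int) (x z : α) (h : k1 x < k1 z) :
    ∀ W : List α,
      PySem.List.insertBy (pvLt2 k2) z (PySem.List.insertBy (pvLtLex k1 k2) x W)
        = PySem.List.insertBy (pvLtLex k1 k2) x (PySem.List.insertBy (pvLt2 k2) z W) := by
  intro W
  induction W with
  | nil =>
      rw [pvIns_nil, pvIns_nil, pvIns_cons, pvIns_cons]
      by_cases h1 : pvLt2 k2 z x = true
      · have h2 : pvLtLex k1 k2 x z = false := by
          rw [pvLt2_iff] at h1
          cases hc : pvLtLex k1 k2 x z with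
          | false => rfl
          | true => exfalso; rw [pvLtLex_iff] at hc; omega
        simp [h1, h2, pvIns_nil]
      · have h1' : pvLt2 k2 z x = false := by simpa using h1
        have h2 : pvLtLex k1 k2 x z = true := by
          rw [pvLtLex_iff]
          have := (pvLt2_iff k2 z x).not.mp (by simp [h1'])
          omega
        simp [h1', h2, pvIns_nil]
  | cons y W ih =>
      rw [pvIns_cons (pvLtLex k1 k2) x y W, pvIns_cons (pvLt2 k2) z y W]
      by_cases hxy : pvLtLex k1 k2 x y = true <;> by_cases hzy : pvLt2 k2 z y = true
      · -- both insert before y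
        simp only [hxy, hzy, if_true]
        rw [pvIns_cons (pvLt2 k2) z x, pvIns_cons (pvLtLex k1 k2) x z]
        by_cases hzx : pvLt2 k2 z x = true
        · have hxz : pvLtLex k1 k2 x z = false := by
            rw [pvLt2_iff] at hzx
            cases hc : pvLtLex k1 k2 x z with
            | false => rfl
            | true => exfalso; rw [pvLtLex_iff] at hc; omega
          simp [hzx, hxz, pvIns_cons, hxy]
        · have hzx' : pvLt2 k2 z x = false := by simpa using hzx
          have hxz : pvLtLex k1 k2 x z = true := by
            rw [pvLtLex_iff]
            have := (pvLt2_iff k2 z x).not.mp (by simp [hzx'])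
            omega
          simp [hzx', hxz, pvIns_cons, hzy]
      · -- x before y, z goes past y
        have hzy' : pvLt2 k2 z y = false := by simpa using hzy
        have hzx : pvLt2 k2 z x = false := by
          rw [pvLtLex_iff] at hxy
          cases hc : pvLt2 k2 z x with
          | false => rfl
          | true =>
              exfalso
              rw [pvLt2_iff] at hc
              have := (pvLt2_iff k2 z y).not.mp (by simp [hzy'])
              omega
        simp only [hxy, hzy', Bool.false_eq_true, if_true, if_false]
        rw [pvIns_cons (pvLt2 k2) z x, pvIns_cons (pvLt2 k2) z y, pvIns_cons (pvLtLex k1 k2) x y]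
        simp [hzx, hzy', hxy]
      · -- z before y, x goes past y
        have hxy' : pvLtLex k1 k2 x y = false := by simpa using hxy
        have hxz : pvLtLex k1 k2 x z = false := by
          cases hc : pvLtLex k1 k2 x z with
          | false => rfl
          | true =>
              exfalso
              rw [pvLtLex_iff] at hc
              have h1 := (pvLtLex_iff k1 k2 x y).not.mp (by simp [hxy'])
              have h2 := (pvLt2_iff k2 z y).mp hzy
              omega
        simp only [hxy', hzy, Bool.false_eq_true, if_true, if_false]
        rw [pvIns_cons (pvLt2 k2) z y, pvIns_cons (pvLtLex k1 k2) x z, pvIns_cons (pvLtLex k1 k2) x y]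
        simp [hzy, hxz, hxy']
      · -- both go past y
        have hxy' : pvLtLex k1 k2 x y = false := by simpa using hxy
        have hzy' : pvLt2 k2 z y = false := by simpa using hzy
        simp only [hxy', hzy', Bool.false_eq_true, if_false]
        rw [pvIns_cons (pvLt2 k2) z y, pvIns_cons (pvLtLex k1 k2) x y]
        simp [hzy', hxy', ih]

theorem pvFoldCommute {α : Type} (k1 k2 : α → Int) (x : α) :
    ∀ v : List α, (∀ z ∈ v, k1 x < k1 z) → ∀ W : List α,
      v.foldl (fun acc z => PySem.List.insertBy (pvLt2 k2) z acc) (PySem.List.insertBy (pvLtLex k1 k2) x W)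
        = PySem.List.insertBy (pvLtLex k1 k2) x (v.foldl (fun acc z => PySem.List.insertBy (pvLt2 k2) z acc) W) := by
  intro v
  induction v with
  | nil => intro _ W; rfl
  | cons z v ih =>
      intro hv W
      rw [List.foldl_cons, List.foldl_cons, pvSC k1 k2 x z (hv z (by simp)) W]
      exact ih (fun z' hz' => hv z' (by simp [hz'])) _

-- a k1-smaller element's lex comparison degenerates to the bare k2 comparison
theorem pvLtLex_eq_lt2 {α : Type} (k1 k2 : α → Int) (x y : α) (h : k1 y ≤ k1 x) :
    pvLtLex k1 k2 x y = pvLt2 k2 x y := by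
  have : decide (k1 x < k1 y) = false := by simp; omega
  simp [pvLtLex, pvLt2, this]

-- THE DOUBLE-SORT THEOREM: A's two stable passes equal one stable lex insertion sort
theorem pvDS {α : Type} (k1 k2 : α → Int) :
    ∀ L : List α,
      PySem.List.sorted (PySem.List.sorted L k1 false) k2 false
        = L.foldl (fun acc x => PySem.List.insertBy (pvLtLex k1 k2) x acc) [] := by
  intro L
  induction L using List.reverseRecOn with
  | nil => simp [PySem.List.sorted_eq_foldl_insertBy]
  | append_singleton T x ih =>
      rw [List.foldl_append, List.foldl_cons, List.foldl_nil, ← ih]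
      have h1 : PySem.List.sorted (T ++ [x]) k1 false
          = PySem.List.insertBy (fun a b => decide (k1 a < k1 b)) x (PySem.List.sorted T k1 false) := by
        rw [pvSorted_append k1 T [x]]; rfl
      rw [h1]
      obtain ⟨u, v, hS, hins, hu, hv⟩ :=
        pvIns_split (fun a b => decide (k1 a < k1 b)) x (PySem.List.sorted T k1 false)
      have hpair : (PySem.List.sorted T k1 false).Pairwise (fun a b => k1 a ≤ k1 b) :=
        PySem.List.sorted_pairwise T k1
      rw [hS] at hpair
      have hvall : ∀ y ∈ v, k1 x < k1 y := by
        intro y hy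
        cases v with
        | nil => simp at hy
        | cons b t =>
            have hb : k1 x < k1 b := by
              have := hv (by simp)
              simpa using this
            rcases List.mem_cons.mp hy with rfl | hy
            · exact hb
            · have : k1 b ≤ k1 y :=
                (List.pairwise_cons.mp (List.pairwise_append.mp hpair).2.1).1 y hy
              omega
      have huall : ∀ y ∈ u, k1 y ≤ k1 x := by
        intro y hy
        have := hu y hy
        simp at this
        omega
      rw [hins, hS]
      rw [PySem.List.sorted_eq_foldl_insertBy, PySem.List.sorted_eq_foldl_insertBy, List.foldl_append,
          List.foldl_append, List.foldl_cons]
      have hins_eq :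
          PySem.List.insertBy (fun a b => decide (k2 a < k2 b)) x
              (u.foldl (fun acc y => PySem.List.insertBy (fun a b => decide (k2 a < k2 b)) y acc) [])
            = PySem.List.insertBy (pvLtLex k1 k2) x
              (u.foldl (fun acc y => PySem.List.insertBy (fun a b => decide (k2 a < k2 b)) y acc) []) := by
        apply (pvIns_congr _ _ x _ _).symm
        intro y hy
        have hyu : y ∈ u := by
          have : y ∈ PySem.List.sorted u k2 false := by
            rw [PySem.List.sorted_eq_foldl_insertBy]; exact hy
          exact (PySem.List.mem_sorted u k2 false y).mp this
        exact pvLtLex_eq_lt2 k1 k2 x y (huall y hyu)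
      show (v.foldl (fun acc y => PySem.List.insertBy (fun a b => decide (k2 a < k2 b)) y acc)
          (PySem.List.insertBy (fun a b => decide (k2 a < k2 b)) x
            (u.foldl (fun acc y => PySem.List.insertBy (fun a b => decide (k2 a < k2 b)) y acc) []))) = _
      rw [hins_eq]
      have := pvFoldCommute k1 k2 x v hvall
        (u.foldl (fun acc y => PySem.List.insertBy (fun a b => decide (k2 a < k2 b)) y acc) [])
      simpa [pvLt2] using this

-- projection to (key, char) pairs commutes with lex insertion (keys are preserved)
theorem pvProj_ins (x : (Int × Int × Int × Int) × String) (S : List ((Int × Int × Int × Int) × String)) :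
    (PySem.List.insertBy (pvLtLex (fun p : (Int × Int × Int × Int) × String => p.1.1) (fun p => p.1.2.1)) x S).map pvProj
      = PySem.List.insertBy (pvLtLex (fun q : (Int × Int) × String => q.1.2) (fun q => q.1.1)) (pvProj x) (S.map pvProj) := by
  induction S with
  | nil => simp [pvIns_nil]
  | cons y S ih =>
      rw [pvIns_cons, List.map_cons, pvIns_cons]
      have hlt : pvLtLex (fun q : (Int × Int) × String => q.1.2) (fun q => q.1.1) (pvProj x) (pvProj y)
          = pvLtLex (fun p : (Int × Int × Int × Int) × String => p.1.1) (fun p => p.1.2.1) x y := rfl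
      rw [hlt]
      by_cases h : pvLtLex (fun p : (Int × Int × Int × Int) × String => p.1.1) (fun p => p.1.2.1) x y = true
      · simp [h]
      · have h' : pvLtLex (fun p : (Int × Int × Int × Int) × String => p.1.1) (fun p => p.1.2.1) x y = false := by simpa using h
        simp [h', ih]

theorem pvProj_fold (L : List ((Int × Int × Int × Int) × String)) :
    ∀ acc : List ((Int × Int × Int × Int) × String),
      L.foldl (fun b p => PySem.List.insertBy (pvLtLex (fun q : (Int × Int) × String => q.1.2) (fun q => q.1.1)) (pvProj p) b) (acc.map pvProj)
        = (L.foldl (fun b p => PySem.List.insertBy (pvLtLex (fun p : (Int × Int × Int × Int) × String => p.1.1) (fun p => p.1.2.1)) p b) acc).map pvProj := by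
  induction L with
  | nil => intro acc; rfl
  | cons p L ih =>
      intro acc
      rw [List.foldl_cons, List.foldl_cons, ← pvProj_ins p acc, ih]

-- dict bookkeeping, generic in the per-box update function
theorem pvGetD_foldl_insert_nil {ν : Type} :
    ∀ (l : List (Int × Int × Int × Int)) (d : PySem.Dict (Int × Int × Int × Int) (List ν)),
      (∀ w, d.getD w [] = []) → ∀ w, (l.foldl (fun d w => d.insert w []) d).getD w [] = [] := by
  intro l
  induction l with
  | nil => intro d h w; exact h w
  | cons a t ih =>
      intro d h w
      refine ih _ (fun w' => ?_) w
      rw [PySem.Dict.getD_insert]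
      split <;> simp [h]

theorem pvInner_getD {ν : Type} (pc : (Int × Int × Int × Int) → Bool) (f : List ν → List ν) :
    ∀ (l : List (Int × Int × Int × Int)) (d : PySem.Dict (Int × Int × Int × Int) (List ν)) (w : Int × Int × Int × Int),
      (l.foldl (fun d w' => if pc w' then d.modify w' [] f else d) d).getD w []
        = if pc w then f^[l.count w] (d.getD w []) else d.getD w [] := by
  intro l
  induction l with
  | nil => intro d w; cases hw : pc w <;> simp
  | cons a t ih =>
      intro d w
      rw [List.foldl_cons]
      cases ha : pc a with
      | false =>
          simp only [Bool.false_eq_true, reduceIte]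
          rw [ih d w, List.count_cons]
          by_cases haw : a = w
          · subst haw; simp [ha]
          · simp [haw]
      | true =>
          simp only [reduceIte]
          rw [ih _ w, PySem.Dict.getD_modify, List.count_cons]
          by_cases hwa : w = a
          · subst hwa
            simp [ha, Function.iterate_succ_apply]
          · have h2 : ¬ (a = w) := fun h => hwa h.symm
            simp [hwa, h2]

theorem pvInner_keys {ν : Type} (pc : (Int × Int × Int × Int) → Bool) (f : List ν → List ν) :
    ∀ (l : List (Int × Int × Int × Int)) (d : PySem.Dict (Int × Int × Int × Int) (List ν)),
      (∀ w ∈ l, w ∈ d.keys) →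
      (l.foldl (fun d w' => if pc w' then d.modify w' [] f else d) d).keys = d.keys := by
  intro l
  induction l with
  | nil => intro d _; rfl
  | cons a t ih =>
      intro d h
      rw [List.foldl_cons]
      cases ha : pc a with
      | false =>
          simp only [Bool.false_eq_true, reduceIte]
          exact ih d (fun w hw => h w (by simp [hw]))
      | true =>
          simp only [reduceIte]
          have hk : (d.modify a [] f).keys = d.keys := by
            rw [PySem.Dict.keys_modify, PySem.Dict.keys_insert_of_contains]
            exact (PySem.Dict.contains_iff_mem_keys d a).mpr (h a (by simp))
          rw [ih _ (fun w hw => hk ▸ h w (by simp [hw])), hk]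

-- the whole character loop, generic in the per-character containment test and bucket update
theorem pvOuter_getD {ν : Type} (wbs : List (Int × Int × Int × Int))
    (pc : ((Int × Int × Int × Int) × String) → (Int × Int × Int × Int) → Bool)
    (F : ((Int × Int × Int × Int) × String) → List ν → List ν) :
    ∀ (l : List ((Int × Int × Int × Int) × String)) (d : PySem.Dict (Int × Int × Int × Int) (List ν)) (w : Int × Int × Int × Int),
      (l.foldl (fun d p =>
        if p.2 == "" then d
        else wbs.foldl (fun d w' => if pc p w' then d.modify w' [] (F p) else d) d) d).getD w []
      = (l.filter (fun p => !(p.2 == ""))).foldl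
          (fun b p => if pc p w then (F p)^[wbs.count w] b else b) (d.getD w []) := by
  intro l
  induction l with
  | nil => intro d w; simp
  | cons p t ih =>
      intro d w
      rw [List.foldl_cons]
      cases hp : (p.2 == "") with
      | true =>
          simp only [reduceIte]
          rw [ih d w]
          simp [hp]
      | false =>
          simp only [Bool.false_eq_true, reduceIte]
          rw [ih _ w, pvInner_getD (fun w' => pc p w') (F p) wbs d w]
          simp only [List.filter_cons, hp, Bool.not_false]
          cases hc : pc p w <;> simp [hc]

theorem pvOuter_keys {ν : Type} (wbs : List (Int × Int × Int × Int))
    (pc : ((Int × Int × Int × Int) × String) → (Int × Int × Int × Int) → Bool)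
    (F : ((Int × Int × Int × Int) × String) → List ν → List ν) :
    ∀ (l : List ((Int × Int × Int × Int) × String)) (d : PySem.Dict (Int × Int × Int × Int) (List ν)),
      (∀ w ∈ wbs, w ∈ d.keys) →
      (l.foldl (fun d p =>
        if p.2 == "" then d
        else wbs.foldl (fun d w' => if pc p w' then d.modify w' [] (F p) else d) d) d).keys = d.keys := by
  intro l
  induction l with
  | nil => intro d _; rfl
  | cons p t ih =>
      intro d h
      rw [List.foldl_cons]
      cases hp : (p.2 == "") with
      | true =>
          simp only [reduceIte]
          exact ih d h
      | false =>
          simp only [Bool.false_eq_true, reduceIte]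
          have hk := pvInner_keys (fun w' => pc p w') (F p) wbs d h
          rw [ih _ (fun w hw => hk ▸ h w hw), hk]

-- iterated per-occurrence updates as folds over replicated elements
theorem pvIterate_append {ν : Type} (x : ν) : ∀ (k : Nat) (b : List ν),
    (fun l => l ++ [x])^[k] b = b ++ List.replicate k x := by
  intro k
  induction k with
  | zero => intro b; simp
  | succ k ih =>
      intro b
      rw [Function.iterate_succ_apply', ih, List.replicate_succ']
      simp

theorem pvIterate_bins (q : (Int × Int) × String) : ∀ (k : Nat) (b : List ((Int × Int) × String)),
    (fun bb => pvBInsert q bb)^[k] b = (List.replicate k q).foldl (fun b q' => pvBInsert q' b) b := by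
  intro k
  induction k with
  | zero => intro b; simp
  | succ k ih =>
      intro b
      rw [Function.iterate_succ_apply, ih, List.replicate_succ, List.foldl_cons]

-- A's bucket loop produces the flat append list
theorem pvFoldIter_A (w : Int × Int × Int × Int) (k : Nat) :
    ∀ (M : List ((Int × Int × Int × Int) × String)) (base : List ((Int × Int × Int × Int) × String)),
      M.foldl (fun b p => if pyIsContained p.1 w then (fun l => l ++ [p])^[k] b else b) base
        = base ++ M.flatMap (fun p => if pyIsContained p.1 w then List.replicate k p else []) := by
  intro M
  induction M with
  | nil => intro base; simp
  | cons p M ih =>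
      intro base
      rw [List.foldl_cons, List.flatMap_cons]
      cases hc : pyIsContained p.1 w with
      | false => simp only [Bool.false_eq_true, reduceIte]; rw [ih]; simp
      | true => simp only [reduceIte]; rw [ih, pvIterate_append]; simp [List.append_assoc]

-- B's bucket loop is a fold of right-insertions over the same flat list (projected)
theorem pvFoldIter_B (w : Int × Int × Int × Int) (k : Nat)
    (pc : ((Int × Int × Int × Int) × String) → (Int × Int × Int × Int) → Bool) :
    ∀ (M : List ((Int × Int × Int × Int) × String)) (base : List ((Int × Int) × String)),
      M.foldl (fun b p => if pc p w then (fun bb => pvBInsert (pvProj p) bb)^[k] b else b) base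
        = (M.flatMap (fun p => if pc p w then List.replicate k (pvProj p) else [])).foldl
            (fun b q => pvBInsert q b) base := by
  intro M
  induction M with
  | nil => intro base; simp
  | cons p M ih =>
      intro base
      rw [List.foldl_cons, List.flatMap_cons, List.foldl_append]
      cases hc : pc p w with
      | false => simp only [Bool.false_eq_true, reduceIte]; rw [ih]; simp
      | true => simp only [reduceIte]; rw [ih, pvIterate_bins]

-- the per-box heart of the equivalence: group-then-double-sort equals fold of online insertions
theorem pvMain (wbs : List (Int × Int × Int × Int)) (M : List ((Int × Int × Int × Int) × String)) (w : Int × Int × Int × Int) :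
    ((PySem.List.sorted (PySem.List.sorted
        (M.flatMap (fun p => if pyIsContained p.1 w then List.replicate (wbs.count w) p else []))
        (fun cd => cd.1.1) false) (fun cd => cd.1.2.1) false).map (fun cd => cd.2))
    = ((M.flatMap (fun p => if pvCont p.1 w then List.replicate (wbs.count w) (pvProj p) else [])).foldl
        (fun b q => pvBInsert q b) []).map (fun q => q.2) := by
  simp only [← pvContA_eq]
  have hmap : (M.flatMap (fun p => if pyIsContained p.1 w then List.replicate (wbs.count w) (pvProj p) else []))
      = (M.flatMap (fun p => if pyIsContained p.1 w then List.replicate (wbs.count w) p else [])).map pvProj := by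
    simp only [List.map_flatMap, apply_ite (List.map pvProj), List.map_replicate, List.map_nil]
  rw [hmap, pvFoldB_eq _ [] List.Pairwise.nil, List.foldl_map]
  have hp := pvProj_fold (M.flatMap (fun p => if pyIsContained p.1 w then List.replicate (wbs.count w) p else [])) []
  simp only [List.map_nil] at hp
  rw [hp, List.map_map, pvDS]
  rfl

-- generic facts about the initial 'words' dict, and a length/emptiness bridge
theorem pvKeys0 {ν : Type} (wbs : List (Int × Int × Int × Int)) :
    (wbs.foldl (fun d w => d.insert w ([] : List ν)) PySem.Dict.empty).keys = PySem.Set.ofList wbs := by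
  rw [PySem.Dict.keys_foldl_insert wbs (fun _ _ => ([] : List ν)) PySem.Dict.empty,
      PySem.Dict.keys_empty, PySem.Set.update_nil_left]

theorem pvGet0 {ν : Type} (wbs : List (Int × Int × Int × Int)) (w : Int × Int × Int × Int) :
    (wbs.foldl (fun d w => d.insert w ([] : List ν)) PySem.Dict.empty).getD w [] = [] :=
  pvGetD_foldl_insert_nil wbs PySem.Dict.empty (fun w' => PySem.Dict.getD_empty w' []) w

theorem pvLen_pos (L : List String) : decide ((0 : Int) < PySem.List.len L) = decide (L ≠ []) := by
  cases L <;> simp [PySem.List.len_eq]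

theorem pvMapFilter {α β : Type} (K : List α) (cA cB : α → Bool) (fA fB : α → β)
    (hc : ∀ w ∈ K, cA w = cB w) (hf : ∀ w ∈ K, fA w = fB w) :
    (K.filter cA).map fA = (K.filter cB).map fB := by
  rw [List.filter_congr hc]
  exact List.map_congr_left (fun w hw => hf w (List.mem_of_mem_filter hw))

-- ===== VERDICT (by name: the statement is the Claim_ definition above) =====
theorem reconstruct_words_spec : Claim_equal_reconstruct_words := by
  intro wbs cs _
  unfold Spec_reconstruct_words
  simp only [reconstruct_words, reconstruct_words_alt]
  set its := (PySem.Dict.ofList (cs.map (fun c => ((c.1, c.2.1, c.2.2.1, c.2.2.2.1), c.2.2.2.2)))).items with hits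
  set dA0 := wbs.foldl (fun d w => d.insert w ([] : List ((Int × Int × Int × Int) × String))) PySem.Dict.empty with hdA0
  set dB0 := wbs.foldl (fun d w => d.insert w ([] : List ((Int × Int) × String))) PySem.Dict.empty with hdB0
  have hmem0A : ∀ w ∈ wbs, w ∈ dA0.keys := by
    rw [hdA0, pvKeys0]; intro w hw; exact (PySem.Set.mem_ofList wbs w).mpr hw
  have hmem0B : ∀ w ∈ wbs, w ∈ dB0.keys := by
    rw [hdB0, pvKeys0]; intro w hw; exact (PySem.Set.mem_ofList wbs w).mpr hw
  have hkA : (its.foldl (fun d p =>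
      if p.2 == "" then d
      else wbs.foldl (fun d w => if pyIsContained p.1 w then d.modify w [] (fun l => l ++ [p]) else d) d) dA0).keys = dA0.keys :=
    pvOuter_keys wbs _ _ its dA0 hmem0A
  have hkB : (its.foldl (fun d p =>
      if p.2 == "" then d
      else wbs.foldl (fun d w =>
        if (decide (p.1.1 ≥ w.1) && decide (p.1.2.1 ≥ w.2.1) && decide (p.1.2.2.1 ≤ w.2.2.1) && decide (p.1.2.2.2 ≤ w.2.2.2)) then
          d.modify w [] (fun bucket => pvBInsert ((p.1.2.1, p.1.1), p.2) bucket)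
        else d) d) dB0).keys = dB0.keys :=
    pvOuter_keys wbs _ _ its dB0 hmem0B
  rw [hdA0, pvKeys0] at hkA
  rw [hdB0, pvKeys0] at hkB
  have hnodupA : (its.foldl (fun d p =>
      if p.2 == "" then d
      else wbs.foldl (fun d w => if pyIsContained p.1 w then d.modify w [] (fun l => l ++ [p]) else d) d) dA0).keys.Nodup := by
    rw [hkA]; exact PySem.Set.nodup_ofList wbs
  have hitemsA := PySem.Dict.items_eq_map_keys _ hnodupA ([] : List ((Int × Int × Int × Int) × String))
  rw [hkA] at hitemsA
  rw [hitemsA]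
  have hnodupB : (its.foldl (fun d p =>
      if p.2 == "" then d
      else wbs.foldl (fun d w =>
        if (decide (p.1.1 ≥ w.1) && decide (p.1.2.1 ≥ w.2.1) && decide (p.1.2.2.1 ≤ w.2.2.1) && decide (p.1.2.2.2 ≤ w.2.2.2)) then
          d.modify w [] (fun bucket => pvBInsert ((p.1.2.1, p.1.1), p.2) bucket)
        else d) d) dB0).keys.Nodup := by
    rw [hkB]; exact PySem.Set.nodup_ofList wbs
  have hvaluesB := PySem.Dict.values_eq_map_keys _ hnodupB ([] : List ((Int × Int) × String))
  rw [hkB] at hvaluesB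
  rw [hvaluesB]
  -- turn both final loops into filter+map
  rw [PySem.List.foldl_append_ite (fun x : (Int × Int × Int × Int) × List String => 0 < PySem.List.len x.2) (fun x => PySem.Str.join "" x.2)]
  rw [PySem.List.foldl_append_ite (fun bucket : List ((Int × Int) × String) => bucket ≠ []) (fun bucket => PySem.Str.join "" (bucket.map (fun q => q.2)))]
  simp only [List.map_map, List.nil_append, List.filter_map, Function.comp_def]
  have hvalA : ∀ w, (List.foldl
        (fun d p =>
          if (p.2 == "") = true then d
          else List.foldl (fun d w => if pyIsContained p.1 w = true then d.modify w [] (fun l => l ++ [p]) else d) d wbs)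
        dA0 its).getD w []
      = (its.filter (fun p => !(p.2 == ""))).flatMap
          (fun p => if pyIsContained p.1 w then List.replicate (wbs.count w) p else []) := by
    intro w
    have h1 : (List.foldl
        (fun d p =>
          if (p.2 == "") = true then d
          else List.foldl (fun d w => if pyIsContained p.1 w = true then d.modify w [] (fun l => l ++ [p]) else d) d wbs)
        dA0 its).getD w []
        = (its.filter (fun p => !(p.2 == ""))).foldl
            (fun b p => if pyIsContained p.1 w then (fun l => l ++ [p])^[wbs.count w] b else b) (dA0.getD w []) :=
      pvOuter_getD wbs _ _ its dA0 w
    rw [h1, hdA0, pvGet0, pvFoldIter_A, List.nil_append]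
  have hvalB : ∀ w, (List.foldl
        (fun d p =>
          if (p.2 == "") = true then d
          else List.foldl (fun d w =>
            if (decide (p.1.1 ≥ w.1) && decide (p.1.2.1 ≥ w.2.1) && decide (p.1.2.2.1 ≤ w.2.2.1) && decide (p.1.2.2.2 ≤ w.2.2.2)) = true then
              d.modify w [] (fun bucket => pvBInsert ((p.1.2.1, p.1.1), p.2) bucket)
            else d) d wbs)
        dB0 its).getD w []
      = ((its.filter (fun p => !(p.2 == ""))).flatMap
          (fun p => if pvCont p.1 w then List.replicate (wbs.count w) (pvProj p) else [])).foldl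
            (fun b q => pvBInsert q b) [] := by
    intro w
    have h1 : (List.foldl
        (fun d p =>
          if (p.2 == "") = true then d
          else List.foldl (fun d w =>
            if (decide (p.1.1 ≥ w.1) && decide (p.1.2.1 ≥ w.2.1) && decide (p.1.2.2.1 ≤ w.2.2.1) && decide (p.1.2.2.2 ≤ w.2.2.2)) = true then
              d.modify w [] (fun bucket => pvBInsert ((p.1.2.1, p.1.1), p.2) bucket)
            else d) d wbs)
        dB0 its).getD w []
        = (its.filter (fun p => !(p.2 == ""))).foldl
            (fun b p => if pvCont p.1 w then (fun bb => pvBInsert (pvProj p) bb)^[wbs.count w] b else b) (dB0.getD w []) :=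
      pvOuter_getD wbs _ _ its dB0 w
    rw [h1, hdB0, pvGet0, pvFoldIter_B]
  simp only [hvalA, hvalB]
  apply pvMapFilter
  · intro w _
    rw [pvMain wbs (its.filter (fun p => !(p.2 == ""))) w, pvLen_pos, decide_eq_decide]
    simp [List.map_eq_nil_iff]
  · intro w _
    rw [pvMain wbs (its.filter (fun p => !(p.2 == ""))) w]
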